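-- pv_equiv track=rewrite | github.com/GabeHannafin/lab-exercises | intro_to_programming/lab8/my_functions.py | while_loop
-- ===== SOURCE A (Python) =====
-- def while_loop(max_number: int=None):
--     """
--     while loop that loops from 1 to n, where n is a positive number saving the
--     number in a list on each loop
--     If no parameter is passed to the function, while_loop()
--     shall return the list of numbers from 1 to 10
--     """
--     # Create an empty list to populate
--     finished_list = []
--
--     def loop_and_append(length: int, step: int =1):
--         # Create an interator that starts at 1 not 0
--         i = 1
--         accumulator = 0
--         # loop until i is equal to 10
--         if step < 0:
--             while i >= length:
--                # append the value to the list
--                finished_list.append(i)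
--                # add every value to the accumulator
--                accumulator += i
--                # increment the iterator
--                i += step
--                # stop counting if i is -12
--                if i < -12:
--                     # break the loop
--                     break
--                 # append the accumulator to the end of the list
--             finished_list.append(accumulator)
--
--
--         else:
--             while i <= length:
--                 # append the value to the list
--                 finished_list.append(i)
--                 # add every value to the accumulator
--                 accumulator += i
--                 # increment the iterator
--                 i += step
--                 # append the accumulator to the end of the list
--                 # stop counting if i is 12
--                 if i > 12:
--                     # break the loop
--                     break
--             finished_list.append(accumulator)
--
--     try:
--             # if no param supplied
--         if max_number == None:
--            # call function to create list
--            loop_and_append(10)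
--            # return the finished list
--            return finished_list
--
--         elif max_number > 0:
--             # call function to create list
--             loop_and_append(max_number)
--             # return the finished list
--             return finished_list
--
--         elif max_number < 0:
--             # call function to create list
--             loop_and_append(max_number, -1)
--             # return the finished list
--             return finished_list
--     except Exception:
--         return "Did you break the break or should we continue?"
-- ===== SOURCE B (Python) =====
-- def while_loop(max_number: int = None):
--     # Closed-bounds re-implementation: compute the capped endpoint, build the
--     # list with range(), and append the sum, instead of A's while/break loop.
--     if max_number is None:
--         max_number = 10
--     if max_number > 0:
--         upper = min(max_number, 12)
--         nums = list(range(1, upper + 1))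
--         return nums + [upper * (upper + 1) // 2]
--     if max_number < 0:
--         lower = max(max_number, -12)
--         nums = list(range(1, lower - 1, -1))
--         return nums + [sum(nums)]
--     return None
-- ===== Notes on version B (the rewrite author's own statement) =====
-- stated objective: simpler
-- what changed: Replaced the while/break accumulator loop with computed capped endpoints (min/max against +-12), a range() list, and a separate closed-form/sum for the appended total.
-- outside the precondition, e.g. on while_loop(0): A returns None, B returns None
import Mathlib
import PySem

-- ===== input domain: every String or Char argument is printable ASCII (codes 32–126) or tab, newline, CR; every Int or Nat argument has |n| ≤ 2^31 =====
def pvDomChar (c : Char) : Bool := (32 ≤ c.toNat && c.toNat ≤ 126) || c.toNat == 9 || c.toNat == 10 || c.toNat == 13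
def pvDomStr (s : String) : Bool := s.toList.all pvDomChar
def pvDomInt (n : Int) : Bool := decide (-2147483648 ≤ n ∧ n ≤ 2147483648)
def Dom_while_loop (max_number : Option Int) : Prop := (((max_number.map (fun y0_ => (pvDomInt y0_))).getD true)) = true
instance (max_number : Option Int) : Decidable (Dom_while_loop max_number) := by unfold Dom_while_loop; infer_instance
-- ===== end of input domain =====

-- B replaces A's while/break accumulator loop by capped endpoints + range + a separate sum (simpler decomposition; equal cost).


-- ===== PORT A =====
-- A's inner while loops as fuel recursion; the fuel (13 / 15) exceeds the
-- maximal iteration count forced by the ±12 break, so it never runs out.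
def loopPosA (fuel : Nat) (length i acc : Int) (lst : List Int) : List Int :=
  match fuel with
  | 0 => lst ++ [acc]
  | fuel + 1 =>
    if i ≤ length then
      let lst' := lst ++ [i]
      let acc' := acc + i
      let i' := i + 1
      if i' > 12 then lst' ++ [acc'] else loopPosA fuel length i' acc' lst'
    else lst ++ [acc]

def loopNegA (fuel : Nat) (length i acc : Int) (lst : List Int) : List Int :=
  match fuel with
  | 0 => lst ++ [acc]
  | fuel + 1 =>
    if i ≥ length then
      let lst' := lst ++ [i]
      let acc' := acc + i
      let i' := i - 1
      if i' < -12 then lst' ++ [acc'] else loopNegA fuel length i' acc' lst'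
    else lst ++ [acc]

def while_loop (max_number : Option Int) : List Int :=
  match max_number with
  | none => loopPosA 13 10 1 0 []
  | some m =>
    if m > 0 then loopPosA 13 m 1 0 []
    else if m < 0 then loopNegA 15 m 1 0 []
    else []  -- Python A returns None here (excluded by Pre_)

-- ===== PORT B =====
def while_loop_alt (max_number : Option Int) : List Int :=
  let m := match max_number with | none => (10 : Int) | some m => m
  if m > 0 then
    let upper := min m 12
    PySem.List.pyRange 1 (upper + 1) 1 ++ [PySem.Int.floordiv (upper * (upper + 1)) 2]
  else if m < 0 then
    let lower := max m (-12)
    let nums := PySem.List.pyRange 1 (lower - 1) (-1)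
    nums ++ [nums.sum]
  else []  -- Python B returns None here (excluded by Pre_)

-- ===== PRECONDITION & SPEC =====
-- Pre_ excludes only max_number = 0, where A returns None, which is not a value of type list[int].
def Pre_while_loop (max_number : Option Int) : Prop := max_number ≠ some 0
instance (max_number : Option Int) : Decidable (Pre_while_loop max_number) := by unfold Pre_while_loop; infer_instance
def pvWitness_while_loop : Option Int := some 5
def Spec_while_loop (max_number : Option Int) (out : List Int) : Prop := out = while_loop_alt max_number
instance (max_number : Option Int) (out : List Int) : Decidable (Spec_while_loop max_number out) := by unfold Spec_while_loop; infer_instance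

-- ===== CLAIM (what is proved, stated in full; the proofs are below) =====
def Claim_equal_while_loop : Prop := ∀ (max_number : Option Int), Dom_while_loop max_number → Pre_while_loop max_number → Spec_while_loop max_number (while_loop max_number)

-- ===== LEMMAS AND PROOFS =====

-- For m ≥ 12 the ±12 break makes A's positive loop independent of m.
theorem loopPosA_cap (fuel : Nat) (m i acc : Int) (lst : List Int)
    (hi : i ≤ 12) (hm : 12 ≤ m) : loopPosA fuel m i acc lst = loopPosA fuel 12 i acc lst := by
  induction fuel generalizing i acc lst with
  | zero => rfl
  | succ fuel ih =>
    simp only [loopPosA]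
    rw [if_pos (by omega), if_pos hi]
    by_cases h : i + 1 > 12
    · rw [if_pos h, if_pos h]
    · rw [if_neg h, if_neg h, ih _ _ _ (by omega)]

theorem loopNegA_cap (fuel : Nat) (m i acc : Int) (lst : List Int)
    (hi : -12 ≤ i) (hm : m ≤ -12) : loopNegA fuel m i acc lst = loopNegA fuel (-12) i acc lst := by
  induction fuel generalizing i acc lst with
  | zero => rfl
  | succ fuel ih =>
    simp only [loopNegA]
    rw [if_pos (by omega), if_pos hi]
    by_cases h : i - 1 < -12
    · rw [if_pos h, if_pos h]
    · rw [if_neg h, if_neg h, ih _ _ _ (by omega)]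

theorem alt_pos_cap (m : Int) (hm : 12 ≤ m) : while_loop_alt (some m) = while_loop_alt (some 12) := by
  simp only [while_loop_alt]
  rw [if_pos (by omega), if_pos (by omega)]
  have : min m 12 = min (12:Int) 12 := by omega
  rw [this]

theorem alt_neg_cap (m : Int) (hm : m ≤ -12) : while_loop_alt (some m) = while_loop_alt (some (-12)) := by
  simp only [while_loop_alt]
  rw [if_neg (by omega), if_pos (by omega), if_neg (by omega), if_pos (by omega)]
  have : max m (-12) = max (-12 : Int) (-12) := by omega
  rw [this]

-- ===== VERDICT (by name: the statement is the Claim_ definition above) =====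
theorem while_loop_spec : Claim_equal_while_loop := by
  intro mo _ hpre
  unfold Spec_while_loop
  match mo with
  | none => decide
  | some m =>
    have hm0 : m ≠ 0 := by intro h; exact hpre (by rw [h])
    rcases lt_trichotomy m 0 with hneg | hz | hpos
    · by_cases hle : m ≤ -12
      · rw [alt_neg_cap m hle]
        show while_loop (some m) = _
        simp only [while_loop]
        rw [if_neg (by omega), if_pos (by omega)]
        rw [loopNegA_cap 15 m 1 0 [] (by omega) hle]
        decide
      · interval_cases m <;> decide
    · exact absurd hz hm0
    · by_cases hge : 12 ≤ m
      · rw [alt_pos_cap m hge]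
        show while_loop (some m) = _
        simp only [while_loop]
        rw [if_pos (by omega)]
        rw [loopPosA_cap 13 m 1 0 [] (by omega) hge]
        decide
      · interval_cases m <;> decide
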